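-- pv_equiv track=rewrite | github.com/v-gapsys/hw | index_builder.py | chunk_by_paragraphs
-- ===== SOURCE A (Python) =====
-- from typing import Dict, List, Tuple
--
-- def chunk_by_paragraphs(paragraphs: List[Dict], paragraphs_per_chunk: int = 1) -> List[List[Dict]]:
--     """Group paragraphs into chunks; preserves paragraph metadata."""
--     if paragraphs_per_chunk < 1:
--         paragraphs_per_chunk = 1
--
--     grouped: List[List[Dict]] = []
--     current: List[Dict] = []
--
--     for para in paragraphs:
--         if not isinstance(para, dict):
--             para = {"text": str(para)}
--         text = para.get("text", "")
--         if not text: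
--             continue
--         current.append(para)
--         if len(current) >= paragraphs_per_chunk:
--             grouped.append(current)
--             current = []
--
--     if current:
--         grouped.append(current)
--
--     return grouped
-- ===== SOURCE B (Python) =====
-- from typing import Dict, List
--
-- def chunk_by_paragraphs(paragraphs: List[Dict], paragraphs_per_chunk: int = 1) -> List[List[Dict]]:
--     """Group paragraphs into chunks; preserves paragraph metadata."""
--     n = max(1, paragraphs_per_chunk)
--     filtered = []
--     for para in paragraphs:
--         if not isinstance(para, dict):
--             para = {"text": str(para)}
--         if para.get("text", ""):
--             filtered.append(para)
--     return [filtered[i:i + n] for i in range(0, len(filtered), n)]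
-- ===== Notes on version B (the rewrite author's own statement) =====
-- stated objective: simpler
-- what changed: Replaces A's stateful grouping (running 'current' accumulator with a trailing flush) by a flat filter pass followed by slice-based chunking over range(0, len, n).
import Mathlib
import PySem

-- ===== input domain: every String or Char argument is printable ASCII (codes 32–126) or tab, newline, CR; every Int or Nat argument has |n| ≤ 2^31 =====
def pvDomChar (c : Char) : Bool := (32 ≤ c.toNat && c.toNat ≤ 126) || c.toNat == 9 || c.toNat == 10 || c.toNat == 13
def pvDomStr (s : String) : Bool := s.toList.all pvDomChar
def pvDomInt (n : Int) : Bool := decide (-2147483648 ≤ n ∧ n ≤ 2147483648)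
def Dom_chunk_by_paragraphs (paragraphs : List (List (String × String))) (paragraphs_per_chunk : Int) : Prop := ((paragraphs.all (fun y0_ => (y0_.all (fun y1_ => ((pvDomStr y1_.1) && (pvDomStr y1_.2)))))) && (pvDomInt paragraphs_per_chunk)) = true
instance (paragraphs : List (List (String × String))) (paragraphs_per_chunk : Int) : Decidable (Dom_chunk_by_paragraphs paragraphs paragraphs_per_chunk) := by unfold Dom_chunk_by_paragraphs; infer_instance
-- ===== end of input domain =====

-- B replaces A's stateful grouping (running `current` list + trailing flush) with a flat
-- filter pass followed by slice-based chunking; objective: simpler, same O(n) cost.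

-- ===== PORT A =====
-- literal transliteration of A; the `isinstance` branch is vacuous under the type
-- convention (every element is a dict), so it disappears; `if current:` is the
-- emptiness test on the trailing accumulator.
def chunk_by_paragraphs (paragraphs : List (List (String × String))) (paragraphs_per_chunk : Int) : List (List (List (String × String))) :=
  let n : Int := if paragraphs_per_chunk < 1 then 1 else paragraphs_per_chunk
  let r := paragraphs.foldl
    (fun (s : List (List (List (String × String))) × List (List (String × String))) para =>
      if PySem.Dict.getD ⟨para⟩ "text" "" == "" then s
      else
        let c := s.2 ++ [para]
        if n ≤ (c.length : Int) then (s.1 ++ [c], []) else (s.1, c))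
    ([], [])
  if r.2.isEmpty then r.1 else r.1 ++ [r.2]

-- ===== PORT B =====
-- `para.get("text", "")` is truthy iff non-empty
def pvHasText (para : List (String × String)) : Bool := !(PySem.Dict.getD ⟨para⟩ "text" "" == "")

def chunk_by_paragraphs_alt (paragraphs : List (List (String × String))) (paragraphs_per_chunk : Int) : List (List (List (String × String))) :=
  let n : Int := max 1 paragraphs_per_chunk
  let filtered := paragraphs.foldl
    (fun acc para => if pvHasText para then acc ++ [para] else acc) []
  (PySem.List.pyRange 0 (filtered.length : Int) n).map
    (fun i => PySem.List.slice filtered (some i) (some (i + n)))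

-- ===== PRECONDITION & SPEC =====
def Spec_chunk_by_paragraphs (paragraphs : List (List (String × String))) (paragraphs_per_chunk : Int) (out : List (List (List (String × String)))) : Prop := out = chunk_by_paragraphs_alt paragraphs paragraphs_per_chunk
instance (paragraphs : List (List (String × String))) (paragraphs_per_chunk : Int) (out : List (List (List (String × String)))) : Decidable (Spec_chunk_by_paragraphs paragraphs paragraphs_per_chunk out) := by unfold Spec_chunk_by_paragraphs; infer_instance

-- ===== CLAIM (what is proved, stated in full; the proofs are below) =====
def Claim_equal_chunk_by_paragraphs : Prop := ∀ (paragraphs : List (List (String × String))) (paragraphs_per_chunk : Int), Dom_chunk_by_paragraphs paragraphs paragraphs_per_chunk → Spec_chunk_by_paragraphs paragraphs paragraphs_per_chunk (chunk_by_paragraphs paragraphs paragraphs_per_chunk)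

-- ===== LEMMAS AND PROOFS =====

-- the common reference: greedy chunks of size n (n > 0)
def chunksRec {α : Type} (n : Nat) (hn : 0 < n) : List α → List (List α)
  | [] => []
  | x :: xs => ((x :: xs).take n) :: chunksRec n hn ((x :: xs).drop n)
termination_by l => l.length
decreasing_by simp; omega

lemma chunksRec_nil {α : Type} (n : Nat) (hn : 0 < n) : chunksRec n hn ([] : List α) = [] := by
  simp [chunksRec]

lemma chunksRec_short {α : Type} (n : Nat) (hn : 0 < n) (c : List α) (hc : c.length ≤ n) :
    chunksRec n hn c = if c.isEmpty then [] else [c] := by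
  cases c with
  | nil => simp [chunksRec]
  | cons x xs =>
    rw [chunksRec]
    rw [List.take_of_length_le hc, List.drop_eq_nil_of_le hc, chunksRec_nil]
    simp

lemma chunksRec_full {α : Type} (n : Nat) (hn : 0 < n) (l rest : List α)
    (hl : l.length = n) : chunksRec n hn (l ++ rest) = l :: chunksRec n hn rest := by
  cases l with
  | nil => simp at hl; omega
  | cons x xs =>
    rw [List.cons_append, chunksRec, ← List.cons_append]
    rw [List.take_append, List.drop_append, hl]
    simp [List.take_of_length_le (le_of_eq hl), List.drop_eq_nil_of_le (le_of_eq hl)]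

-- A's loop with accumulator state (grouped, current) produces greedy chunks of the filtered list
lemma foldA {α : Type} (n : Nat) (hn : 0 < n) (bad : α → Bool) :
    ∀ (xs : List α) (g : List (List α)) (c : List α), c.length < n →
    (let r := xs.foldl
        (fun (s : List (List α) × List α) para =>
          if bad para then s
          else
            let c' := s.2 ++ [para]
            if (n : Int) ≤ (c'.length : Int) then (s.1 ++ [c'], ([] : List α)) else (s.1, c'))
        (g, c)
     if r.2.isEmpty then r.1 else r.1 ++ [r.2])
    = g ++ chunksRec n hn (c ++ xs.filter (fun x => !bad x)) := by
  intro xs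
  induction xs with
  | nil =>
    intro g c hc
    simp only [List.foldl_nil, List.filter_nil, List.append_nil]
    rw [chunksRec_short n hn c (le_of_lt hc)]
    cases c <;> simp
  | cons x xs ih =>
    intro g c hc
    simp only [List.foldl_cons, List.filter_cons, Bool.not_eq_eq_eq_not, Bool.not_true]
    cases hbad : bad x with
    | true =>
      simp only [if_true, Bool.true_eq_false, if_false]
      exact ih g c hc
    | false =>
      simp only [Bool.false_eq_true, if_false, reduceIte]
      by_cases hfull : (n : Int) ≤ ((c ++ [x]).length : Int)
      · have hlen : (c ++ [x]).length = n := by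
          simp only [List.length_append, List.length_cons, List.length_nil,
            Nat.cast_add, Nat.cast_one] at hfull ⊢
          omega
        simp only [if_pos hfull]
        rw [ih (g ++ [c ++ [x]]) [] (by simpa using hn)]
        rw [show c ++ x :: List.filter (fun x => !bad x) xs
              = (c ++ [x]) ++ List.filter (fun x => !bad x) xs by simp]
        rw [chunksRec_full n hn _ _ hlen]
        simp
      · simp only [if_neg hfull]
        have hlt : (c ++ [x]).length < n := by
          simp only [List.length_append, List.length_cons, List.length_nil,
            Nat.cast_add, Nat.cast_one, not_le] at hfull ⊢
          omega
        rw [ih g (c ++ [x]) hlt]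
        simp

-- pyRange with positive step: nil and cons forms
lemma pyRangePosNil (a b s : Int) (hab : b ≤ a) (hs : 0 < s) :
    PySem.List.pyRange a b s = [] := by
  rw [PySem.List.pyRange_of_pos a b hs]
  rw [if_neg (by omega)]
  simp

lemma pyRangePosCons (a b s : Int) (hab : a < b) (hs : 0 < s) :
    PySem.List.pyRange a b s = a :: PySem.List.pyRange (a + s) b s := by
  rw [PySem.List.pyRange_of_pos a b hs, PySem.List.pyRange_of_pos (a + s) b hs]
  rw [if_pos hab]
  have hdiv : (b - a + s - 1) / s = (b - a - 1) / s + 1 := by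
    rw [show b - a + s - 1 = (b - a - 1) + 1 * s by ring]
    rw [Int.add_mul_ediv_right _ _ (ne_of_gt hs)]
  by_cases h2 : a + s < b
  · rw [if_pos h2]
    have hq : (b - (a + s) + s - 1) / s = (b - a - 1) / s := by ring_nf
    have hnn : 0 ≤ (b - a - 1) / s := Int.ediv_nonneg (by omega) (le_of_lt hs)
    have hM : (b - a + s - 1) / s = (b - (a + s) + s - 1) / s + 1 := by rw [hq, hdiv]
    have hMt : ((b - a + s - 1) / s).toNat = ((b - (a + s) + s - 1) / s).toNat + 1 := by
      rw [hq] at hM ⊢; omega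
    rw [hMt, List.range_succ_eq_map, List.map_cons, List.map_map]
    congr 1
    · simp
    · apply List.map_congr_left
      intro k _
      simp [Nat.succ_eq_add_one]
      ring
  · rw [if_neg h2]
    have hz : (b - a - 1) / s = 0 := Int.ediv_eq_zero_of_lt (by omega) (by omega)
    have hM : ((b - a + s - 1) / s).toNat = 1 := by rw [hdiv, hz]; rfl
    rw [hM]
    simp

lemma pyRangeShift (a b s d : Int) (hs : 0 < s) :
    PySem.List.pyRange (a + d) (b + d) s = (PySem.List.pyRange a b s).map (· + d) := by
  rw [PySem.List.pyRange_of_pos a b hs, PySem.List.pyRange_of_pos (a + d) (b + d) hs]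
  rw [show b + d - (a + d) = b - a by ring]
  by_cases hab : a < b
  · rw [if_pos (by omega), if_pos hab, List.map_map]
    apply List.map_congr_left
    intro k _
    simp
    ring
  · rw [if_neg (by omega), if_neg hab]
    simp

-- B's slice comprehension produces the same greedy chunks
lemma Bchunks {α : Type} (n : Nat) (hn : 0 < n) :
    ∀ (m : Nat) (l : List α), l.length ≤ m →
    (PySem.List.pyRange 0 (l.length : Int) (n : Int)).map
      (fun i => PySem.List.slice l (some i) (some (i + (n : Int))))
    = chunksRec n hn l := by
  intro m
  induction m with
  | zero =>
    intro l hl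
    have : l = [] := List.eq_nil_of_length_eq_zero (by omega)
    subst this
    simp [pyRangePosNil 0 0 (n : Int) (by omega) (by exact_mod_cast hn), chunksRec_nil]
  | succ m ih =>
    intro l hl
    cases l with
    | nil => simp [pyRangePosNil 0 0 (n : Int) (by omega) (by exact_mod_cast hn), chunksRec_nil]
    | cons x xs =>
      have hns : (0 : Int) < (n : Int) := by exact_mod_cast hn
      have hpos : (0 : Int) < ((x :: xs).length : Int) := by simp
      rw [pyRangePosCons 0 _ _ hpos hns, List.map_cons]
      have hhead : PySem.List.slice (x :: xs) (some 0) (some (0 + (n : Int)))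
          = (x :: xs).take n := by
        rw [PySem.List.slice_zero_start, PySem.List.slice_to _ (by omega)]
        congr 1
        omega
      rw [hhead]
      rw [chunksRec]
      congr 1
      by_cases hlen : (x :: xs).length ≤ n
      · rw [pyRangePosNil _ _ _ (by simp at hlen ⊢; omega) hns]
        rw [List.drop_eq_nil_of_le hlen, chunksRec_nil]
        simp
      · rw [not_le] at hlen
        have hcast : ((x :: xs).length : Int) = (((x :: xs).drop n).length : Int) + (n : Int) := by
          rw [List.length_drop, Nat.cast_sub (le_of_lt hlen)]
          ring
        rw [hcast, pyRangeShift 0 _ _ _ hns, List.map_map]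
        rw [← ih ((x :: xs).drop n) (by rw [List.length_drop]; simp at hl ⊢; omega)]
        apply List.map_congr_left
        intro i hi
        have hi0 : 0 ≤ i := ((PySem.List.mem_pyRange_iff_of_pos hns i).mp hi).1
        obtain ⟨j, rfl⟩ : ∃ j : Nat, i = (j : Int) := ⟨i.toNat, by omega⟩
        simp only [Function.comp]
        have hL : PySem.List.slice (x :: xs) (some ((j : Int) + (n : Int)))
              (some ((j : Int) + (n : Int) + (n : Int)))
            = List.take n (List.drop (j + n) (x :: xs)) := by
          rw [show ((j : Int) + (n : Int)) = ((j + n : Nat) : Int) by push_cast; ring]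
          exact PySem.List.slice_natCast_add _ (j + n) n
        rw [PySem.List.slice_natCast_add ((x :: xs).drop n) j n, hL]
        rw [List.drop_drop, Nat.add_comm n j]

-- ===== VERDICT (by name: the statement is the Claim_ definition above) =====
theorem chunk_by_paragraphs_spec : Claim_equal_chunk_by_paragraphs := by
  intro paragraphs k _
  unfold Spec_chunk_by_paragraphs
  have h1 : (1 : Int) ≤ max 1 k := le_max_left 1 k
  obtain ⟨N, hNeq, hNpos⟩ : ∃ N : Nat, max 1 k = (N : Int) ∧ 0 < N :=
    ⟨(max 1 k).toNat, by omega, by omega⟩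
  have hifn : (if k < 1 then (1 : Int) else k) = (N : Int) := by
    rw [← hNeq]
    split_ifs with h
    · exact (max_eq_left (by omega)).symm
    · exact (max_eq_right (by omega)).symm
  simp only [chunk_by_paragraphs, chunk_by_paragraphs_alt]
  rw [hifn, hNeq]
  rw [show paragraphs.foldl (fun acc para => if pvHasText para then acc ++ [para] else acc)
        ([] : List (List (String × String))) = paragraphs.filter pvHasText from by
      simpa using PySem.List.foldl_append_if pvHasText (fun x => x) paragraphs []]
  rw [Bchunks N hNpos (paragraphs.filter pvHasText).length _ le_rfl]
  have hA := foldA N hNpos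
      (fun para : List (String × String) => PySem.Dict.getD ⟨para⟩ "text" "" == "")
      paragraphs [] [] hNpos
  simpa [pvHasText] using hA
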